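-- pv_equiv track=rewrite | github.com/healthonrails/annolid | annolid/segmentation/videomt_onnx.py | _choose_seed_frame
-- ===== SOURCE A (Python) =====
-- def _choose_seed_frame(requested_frame: int, available_frames: list[int]) -> int | None:
--     if not available_frames:
--         return None
--     unique_sorted = sorted(set(int(v) for v in available_frames))
--     req = int(requested_frame)
--     if req in unique_sorted:
--         return req
--     previous = [idx for idx in unique_sorted if idx <= req]
--     if previous:
--         return previous[-1]
--     return unique_sorted[0]
-- ===== SOURCE B (Python) =====
-- def _choose_seed_frame(requested_frame: int, available_frames: list[int]) -> int | None:
--     # One linear pass: track the largest frame <= requested and the global minimum.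
--     if not available_frames:
--         return None
--     req = int(requested_frame)
--     best = None
--     mn = available_frames[0]
--     for v in available_frames:
--         if v <= req and (best is None or v > best):
--             best = v
--         if v < mn:
--             mn = v
--     return mn if best is None else best
-- ===== Notes on version B (the rewrite author's own statement) =====
-- stated objective: faster
-- what changed: Replaces sort-of-deduplicated-set plus membership test plus filtered-list scan with a single linear pass that tracks the largest frame <= requested and the global minimum.
import Mathlib
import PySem

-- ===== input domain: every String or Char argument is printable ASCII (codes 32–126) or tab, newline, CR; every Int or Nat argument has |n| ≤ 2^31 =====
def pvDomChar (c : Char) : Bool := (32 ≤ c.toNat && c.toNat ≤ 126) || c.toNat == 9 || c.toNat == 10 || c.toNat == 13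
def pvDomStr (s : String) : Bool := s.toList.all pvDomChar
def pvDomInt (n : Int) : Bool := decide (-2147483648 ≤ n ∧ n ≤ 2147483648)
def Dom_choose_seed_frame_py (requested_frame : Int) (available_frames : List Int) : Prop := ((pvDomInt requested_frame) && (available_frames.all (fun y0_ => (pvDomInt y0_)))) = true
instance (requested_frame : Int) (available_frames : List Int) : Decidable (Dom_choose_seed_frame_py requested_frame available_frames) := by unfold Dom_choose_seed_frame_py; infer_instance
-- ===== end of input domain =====

-- B replaces A's sort-of-the-deduplicated-set (plus membership test and filtered scan) by a
-- single linear pass tracking the largest frame <= requested and the global minimum (objective: faster).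

-- ===== PORT A =====
def choose_seed_frame_py (requested_frame : Int) (available_frames : List Int) : Option Int :=
  if available_frames = [] then none
  else
    let unique_sorted := PySem.List.sorted (PySem.Set.ofList available_frames) (fun x => x) false
    let req := requested_frame
    if req ∈ unique_sorted then some req
    else
      let previous := unique_sorted.filter (fun idx => idx ≤ req)
      if previous ≠ [] then PySem.List.pyGet? previous (-1)
      else PySem.List.pyGet? unique_sorted 0

-- ===== PORT B =====
-- one step of Source B's loop body: update `best` (largest value ≤ req seen) and `mn` (minimum seen)
def pvStepB (req : Int) (st : Option Int × Int) (v : Int) : Option Int × Int :=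
  ( if v ≤ req then
      match st.1 with
      | none => some v
      | some b => if b < v then some v else some b
    else st.1,
    if v < st.2 then v else st.2 )

def choose_seed_frame_py_alt (requested_frame : Int) (available_frames : List Int) : Option Int :=
  match available_frames with
  | [] => none
  | h :: _ =>
    let st := available_frames.foldl (pvStepB requested_frame) (none, h)
    match st.1 with
    | some b => some b
    | none => some st.2

-- ===== PRECONDITION & SPEC =====
def Spec_choose_seed_frame_py (requested_frame : Int) (available_frames : List Int) (out : Option Int) : Prop := out = choose_seed_frame_py_alt requested_frame available_frames
instance (requested_frame : Int) (available_frames : List Int) (out : Option Int) : Decidable (Spec_choose_seed_frame_py requested_frame available_frames out) := by unfold Spec_choose_seed_frame_py; infer_instance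

-- ===== CLAIM (what is proved, stated in full; the proofs are below) =====
def Claim_equal_choose_seed_frame_py : Prop := ∀ (requested_frame : Int) (available_frames : List Int), Dom_choose_seed_frame_py requested_frame available_frames → Spec_choose_seed_frame_py requested_frame available_frames (choose_seed_frame_py requested_frame available_frames)

-- ===== LEMMAS AND PROOFS =====

-- the `best` component of B's fold, alone
def pvBF (req : Int) (b : Option Int) (v : Int) : Option Int :=
  if v ≤ req then
    match b with
    | none => some v
    | some b' => if b' < v then some v else some b'
  else b

-- the `mn` component of B's fold, alone
def pvMF (m v : Int) : Int := if v < m then v else m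

lemma pvBF_cases (req : Int) (b0 : Option Int) (v : Int) :
    (¬ v ≤ req ∧ pvBF req b0 v = b0) ∨
    (v ≤ req ∧ ∃ b, pvBF req b0 v = some b ∧ (b0 = some b ∨ b = v) ∧ v ≤ b ∧
      (∀ c, b0 = some c → c ≤ b)) := by
  unfold pvBF
  split
  · right
    refine ⟨by assumption, ?_⟩
    cases b0 with
    | none => exact ⟨v, rfl, Or.inr rfl, le_refl v, by simp⟩
    | some c =>
      by_cases h : c < v
      · exact ⟨v, by simp [h], Or.inr rfl, le_refl v, by intro c' hc'; injection hc' with hc'; omega⟩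
      · exact ⟨c, by simp [h], Or.inl rfl, by omega, by intro c' hc'; injection hc' with hc'; omega⟩
  · left; exact ⟨by assumption, rfl⟩

lemma pvStepB_split (req : Int) : ∀ (l : List Int) (b0 : Option Int) (m0 : Int),
    l.foldl (pvStepB req) (b0, m0) = (l.foldl (pvBF req) b0, l.foldl pvMF m0) := by
  intro l
  induction l with
  | nil => intro b0 m0; rfl
  | cons v t ih =>
    intro b0 m0
    simp only [List.foldl_cons]
    exact ih (pvBF req b0 v) (pvMF m0 v)

-- characterization of the `best` fold
lemma pvBF_spec (req : Int) : ∀ (l : List Int) (b0 : Option Int),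
    (∀ b, b0 = some b → b ≤ req) →
    match l.foldl (pvBF req) b0 with
    | none => b0 = none ∧ ∀ v ∈ l, ¬ v ≤ req
    | some m => (b0 = some m ∨ (m ∈ l ∧ m ≤ req)) ∧ (∀ v ∈ l, v ≤ req → v ≤ m) ∧
                (∀ b, b0 = some b → b ≤ m) := by
  intro l
  induction l with
  | nil =>
    intro b0 hb0
    cases b0 with
    | none => simp [List.foldl]
    | some b => exact ⟨Or.inl rfl, by simp, by intro c hc; injection hc with hc; omega⟩
  | cons v t ih =>
    intro b0 hb0
    simp only [List.foldl_cons]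
    rcases pvBF_cases req b0 v with ⟨hvr, heq⟩ | ⟨hvr, b, heq, horig, hvleb, hmono⟩
    · rw [heq]
      have h := ih b0 hb0
      rcases hr : t.foldl (pvBF req) b0 with _ | m <;> rw [hr] at h
      · exact ⟨h.1, by
          intro x hx
          rcases List.mem_cons.mp hx with rfl | hx
          · exact hvr
          · exact h.2 _ hx⟩
      · obtain ⟨h1, h2, h3⟩ := h
        refine ⟨?_, ?_, h3⟩
        · rcases h1 with h1 | h1
          · exact Or.inl h1
          · exact Or.inr ⟨List.mem_cons_of_mem _ h1.1, h1.2⟩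
        · intro x hx hxr
          rcases List.mem_cons.mp hx with rfl | hx
          · exact absurd hxr hvr
          · exact h2 _ hx hxr
    · rw [heq]
      have hb : b ≤ req := by
        rcases horig with horig | rfl
        · exact hb0 b horig
        · exact hvr
      have h := ih (some b) (by intro c hc; injection hc with hc; omega)
      rcases hr : t.foldl (pvBF req) (some b) with _ | m <;> rw [hr] at h
      · exact absurd h.1 (by simp)
      · obtain ⟨h1, h2, h3⟩ := h
        have hbm : b ≤ m := h3 b rfl
        refine ⟨?_, ?_, ?_⟩
        · rcases h1 with h1 | h1
          · injection h1 with h1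
            subst h1
            rcases horig with horig | rfl
            · exact Or.inl horig
            · exact Or.inr ⟨List.mem_cons_self, hb⟩
          · exact Or.inr ⟨List.mem_cons_of_mem _ h1.1, h1.2⟩
        · intro x hx hxr
          rcases List.mem_cons.mp hx with rfl | hx
          · omega
          · exact h2 _ hx hxr
        · intro c hc
          have := hmono c hc
          omega

-- characterization of the `mn` fold
lemma pvMF_spec : ∀ (l : List Int) (m0 : Int),
    (l.foldl pvMF m0 = m0 ∨ l.foldl pvMF m0 ∈ l) ∧
    l.foldl pvMF m0 ≤ m0 ∧ ∀ v ∈ l, l.foldl pvMF m0 ≤ v := by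
  intro l
  induction l with
  | nil => simp
  | cons v t ih =>
    intro m0
    simp only [List.foldl_cons]
    obtain ⟨h1, h2, h3⟩ := ih (pvMF m0 v)
    have hmv : pvMF m0 v ≤ m0 ∧ pvMF m0 v ≤ v := by unfold pvMF; split <;> omega
    constructor
    · rcases h1 with h1 | h1
      · rw [h1]; unfold pvMF; split
        · right; exact List.mem_cons_self
        · left; rfl
      · right; exact List.mem_cons_of_mem _ h1
    · refine ⟨le_trans h2 hmv.1, ?_⟩
      intro x hx
      rcases List.mem_cons.mp hx with rfl | hx
      · exact le_trans h2 hmv.2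
      · exact h3 _ hx

-- the last element of a strictly increasing list is its greatest element
lemma pvLast_greatest : ∀ (p : List Int), p.Pairwise (· < ·) → ∀ g, p.getLast? = some g →
    g ∈ p ∧ ∀ x ∈ p, x ≤ g := by
  intro p
  induction p with
  | nil => simp
  | cons a q ih =>
    intro hp g hg
    cases q with
    | nil =>
      simp at hg
      subst hg
      simp
    | cons b r =>
      have hg' : (b :: r).getLast? = some g := by
        simpa [List.getLast?_cons_cons] using hg
      obtain ⟨hmem, hle⟩ := ih hp.of_cons g hg'
      have ha : ∀ x ∈ b :: r, a < x := fun x hx => List.rel_of_pairwise_cons hp hx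
      refine ⟨List.mem_cons_of_mem _ hmem, ?_⟩
      intro x hx
      rcases List.mem_cons.mp hx with rfl | hx
      · exact le_of_lt (ha g hmem)
      · exact hle _ hx

-- B's port, with its fold split into the two independent accumulators
lemma pvAlt_eq (req h : Int) (t : List Int) : choose_seed_frame_py_alt req (h :: t) =
    match (h :: t).foldl (pvBF req) none with
    | some b => some b
    | none => some ((h :: t).foldl pvMF h) := by
  have h0 : choose_seed_frame_py_alt req (h :: t) =
      (match ((h :: t).foldl (pvStepB req) (none, h)).1 with
       | some b => some b
       | none => some (((h :: t).foldl (pvStepB req) (none, h)).2)) := rfl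
  rw [h0, pvStepB_split]

-- A's port on a non-empty list, with the lets inlined
lemma pvA_eq (req h : Int) (t : List Int) : choose_seed_frame_py req (h :: t) =
    (if req ∈ PySem.List.sorted (PySem.Set.ofList (h :: t)) (fun x => x) false then some req
     else
       if (PySem.List.sorted (PySem.Set.ofList (h :: t)) (fun x => x) false).filter
            (fun idx => idx ≤ req) ≠ [] then
         PySem.List.pyGet? ((PySem.List.sorted (PySem.Set.ofList (h :: t)) (fun x => x) false).filter
            (fun idx => idx ≤ req)) (-1)
       else PySem.List.pyGet? (PySem.List.sorted (PySem.Set.ofList (h :: t)) (fun x => x) false) 0) := by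
  unfold choose_seed_frame_py
  rw [if_neg (by simp)]

-- ===== VERDICT (by name: the statement is the Claim_ definition above) =====
theorem choose_seed_frame_py_spec : Claim_equal_choose_seed_frame_py := by
  intro req l _
  unfold Spec_choose_seed_frame_py
  cases l with
  | nil => rfl
  | cons h t =>
    rw [pvA_eq, pvAlt_eq]
    set us := PySem.List.sorted (PySem.Set.ofList (h :: t)) (fun x => x) false with hus
    have hmem : ∀ x : Int, x ∈ us ↔ x ∈ h :: t := by
      intro x
      rw [hus]
      rw [PySem.List.mem_sorted (PySem.Set.ofList (h :: t)) (fun x => x) false x]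
      exact PySem.Set.mem_ofList (h :: t) x
    have hpair : us.Pairwise (· < ·) := by
      rw [hus]; exact PySem.List.sorted_ofList_pairwise_lt (h :: t)
    have hB := pvBF_spec req (h :: t) none (by simp)
    have hM := pvMF_spec (h :: t) h
    set B := (h :: t).foldl (pvBF req) none with hBdef
    set M := (h :: t).foldl pvMF h with hMdef
    have hMl : M ∈ h :: t := by
      rcases hM.1 with h1 | h1
      · rw [h1]; exact List.mem_cons_self
      · exact h1
    by_cases hreq : req ∈ us
    · rw [if_pos hreq]
      rcases hBv : B with _ | m <;> rw [hBv] at hB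
      · have hB' : (none : Option Int) = none ∧ ∀ v ∈ h :: t, ¬ v ≤ req := hB
        exact absurd le_rfl (hB'.2 req ((hmem req).mp hreq))
      · have hB' : ((none : Option Int) = some m ∨ (m ∈ h :: t ∧ m ≤ req)) ∧
            (∀ v ∈ h :: t, v ≤ req → v ≤ m) ∧ (∀ b : Int, (none : Option Int) = some b → b ≤ m) := hB
        obtain ⟨h1, h2, _⟩ := hB'
        have hm : m ∈ h :: t ∧ m ≤ req := by
          rcases h1 with h1 | h1
          · exact absurd h1 (by simp)
          · exact h1
        have hmr : m = req := le_antisymm hm.2 (h2 req ((hmem req).mp hreq) le_rfl)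
        rw [hmr]
    · rw [if_neg hreq]
      set previous := us.filter (fun idx => decide (idx ≤ req)) with hprevdef
      have hprevmem : ∀ x : Int, x ∈ previous ↔ x ∈ (h :: t) ∧ x ≤ req := by
        intro x
        rw [hprevdef, List.mem_filter, hmem]
        simp
      by_cases hprev : previous = []
      · rw [if_neg (by simp [hprev])]
        have hBnone : B = none := by
          rcases hBv : B with _ | m
          · rfl
          · rw [hBv] at hB
            have hB' : ((none : Option Int) = some m ∨ (m ∈ h :: t ∧ m ≤ req)) ∧
                (∀ v ∈ h :: t, v ≤ req → v ≤ m) ∧ (∀ b : Int, (none : Option Int) = some b → b ≤ m) := hB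
            have hm : m ∈ h :: t ∧ m ≤ req := by
              rcases hB'.1 with h1 | h1
              · exact absurd h1 (by simp)
              · exact h1
            have hmp : m ∈ previous := (hprevmem m).mpr hm
            rw [hprev] at hmp
            simp at hmp
        rw [hBnone]
        rcases hu : us with _ | ⟨u0, ur⟩
        · exfalso
          have hh := (hmem h).mpr List.mem_cons_self
          rw [hu] at hh
          simp at hh
        · have hsorted_eq : PySem.List.sorted (PySem.Set.ofList (h :: t)) (fun x => x) false = u0 :: ur :=
            hus.symm.trans hu
          have hu0min : ∀ y ∈ (h :: t), u0 ≤ y := by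
            intro y hy
            exact PySem.List.key_head_sorted_le _ _ hsorted_eq y ((PySem.Set.mem_ofList (h :: t) y).mpr hy)
          have hu0mem : u0 ∈ (h :: t) := (hmem u0).mp (by rw [hu]; exact List.mem_cons_self)
          have hu0M : u0 = M := le_antisymm (hu0min M hMl) (hM.2.2 u0 hu0mem)
          rw [PySem.List.pyGet?_zero]
          simp [hu0M]
      · rw [if_pos hprev]
        rw [PySem.List.pyGet?_neg_one]
        rcases hg : previous.getLast? with _ | g
        · rw [List.getLast?_eq_none_iff] at hg
          exact absurd hg hprev
        · have hppair : previous.Pairwise (· < ·) := hpair.filter _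
          obtain ⟨hgmem, hgle⟩ := pvLast_greatest previous hppair g hg
          have hgl : g ∈ (h :: t) ∧ g ≤ req := (hprevmem g).mp hgmem
          rcases hBv : B with _ | m <;> rw [hBv] at hB
          · have hB' : (none : Option Int) = none ∧ ∀ v ∈ h :: t, ¬ v ≤ req := hB
            exact absurd hgl.2 (hB'.2 g hgl.1)
          · have hB' : ((none : Option Int) = some m ∨ (m ∈ h :: t ∧ m ≤ req)) ∧
                (∀ v ∈ h :: t, v ≤ req → v ≤ m) ∧ (∀ b : Int, (none : Option Int) = some b → b ≤ m) := hB
            obtain ⟨h1, h2, _⟩ := hB'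
            have hm : m ∈ h :: t ∧ m ≤ req := by
              rcases h1 with h1 | h1
              · exact absurd h1 (by simp)
              · exact h1
            have hmp : m ∈ previous := (hprevmem m).mpr hm
            have hgm : g = m := le_antisymm (h2 g hgl.1 hgl.2) (hgle m hmp)
            rw [hgm]
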